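-- pv_equiv track=rewrite | github.com/jeevan1239/DWL_2 | backend/main.py | _should_skip_url
-- ===== SOURCE A (Python) =====
-- def _should_skip_url(url: str) -> bool:
--     lowered = url.lower()
--     return any(
--         lowered.endswith(ext)
--         for ext in (
--             ".pdf",
--             ".jpg",
--             ".jpeg",
--             ".png",
--             ".gif",
--             ".svg",
--             ".zip",
--             ".mp4",
--             ".mp3",
--             ".avi",
--             ".doc",
--             ".docx",
--             ".xls",
--             ".xlsx",
--         )
--     )
-- ===== SOURCE B (Python) =====
-- _SKIP_EXTS = {"pdf", "jpg", "jpeg", "png", "gif", "svg", "zip",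
--               "mp4", "mp3", "avi", "doc", "docx", "xls", "xlsx"}
--
--
-- def _should_skip_url(url: str) -> bool:
--     parts = url.lower().rsplit('.', 1)
--     return len(parts) == 2 and parts[1] in _SKIP_EXTS
-- ===== Notes on version B (the rewrite author's own statement) =====
-- stated objective: idiomatic
-- what changed: Instead of scanning 14 dotted suffixes with endswith, B isolates the extension once with rsplit('.', 1) and tests it against a set of 14 bare extensions with one membership lookup.
import Mathlib
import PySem

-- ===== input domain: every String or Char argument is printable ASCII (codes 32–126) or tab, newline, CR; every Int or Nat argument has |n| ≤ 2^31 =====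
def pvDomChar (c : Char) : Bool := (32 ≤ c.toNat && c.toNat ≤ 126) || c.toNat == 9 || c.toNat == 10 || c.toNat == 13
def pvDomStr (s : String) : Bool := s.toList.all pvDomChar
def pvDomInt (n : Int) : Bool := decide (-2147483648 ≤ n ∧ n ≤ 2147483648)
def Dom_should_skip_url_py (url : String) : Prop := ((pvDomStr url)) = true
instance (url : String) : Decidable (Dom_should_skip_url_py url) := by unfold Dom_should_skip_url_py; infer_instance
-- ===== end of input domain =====

-- B replaces the 14-way endswith scan by one rsplit('.', 1) plus a set lookup (idiomatic).

-- ===== PORT A =====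
def should_skip_url_py (url : String) : Bool :=
  let lowered := PySem.Str.lower url
  [".pdf", ".jpg", ".jpeg", ".png", ".gif", ".svg", ".zip",
   ".mp4", ".mp3", ".avi", ".doc", ".docx", ".xls", ".xlsx"].any
    (fun ext => PySem.Str.endswith lowered ext)

-- ===== PORT B =====
-- the set literal _SKIP_EXTS
def skipExts : PySem.Set String :=
  PySem.Set.ofList ["pdf", "jpg", "jpeg", "png", "gif", "svg", "zip",
                    "mp4", "mp3", "avi", "doc", "docx", "xls", "xlsx"]

-- hand port of str.rsplit('.', 1) (no PySem primitive): one piece if there is no '.',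
-- otherwise the part before and the part after the LAST '.'; exact on all strings
def pyRsplit1Dot (cs : List Char) : List (List Char) :=
  let r := cs.reverse
  let e := r.takeWhile (· ≠ '.')
  if e.length = r.length then [cs]
  else [(r.drop (e.length + 1)).reverse, e.reverse]

-- len(parts) == 2 and parts[1] in _SKIP_EXTS, as a match on the rsplit result
def should_skip_url_py_alt (url : String) : Bool :=
  match pyRsplit1Dot (PySem.Str.lower url).toList with
  | [_, ext] => PySem.Set.contains skipExts (String.ofList ext)
  | _ => false

-- ===== PRECONDITION & SPEC =====
def Spec_should_skip_url_py (url : String) (out : Bool) : Prop := out = should_skip_url_py_alt url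
instance (url : String) (out : Bool) : Decidable (Spec_should_skip_url_py url out) := by unfold Spec_should_skip_url_py; infer_instance

-- ===== CLAIM (what is proved, stated in full; the proofs are below) =====
def Claim_equal_should_skip_url_py : Prop := ∀ (url : String), Dom_should_skip_url_py url → Spec_should_skip_url_py url (should_skip_url_py url)

-- ===== LEMMAS AND PROOFS =====

-- (d ++ ['.']) is a prefix of r iff r starts with d (dot-free) followed by '.',
-- i.e. iff the dot-free head of r is exactly d and r contains a '.'
lemma prefix_dot_iff (d : List Char) (hd : ∀ c ∈ d, c ≠ '.') :
    ∀ (r : List Char), ((d ++ ['.']) <+: r ↔ ('.' ∈ r ∧ r.takeWhile (· ≠ '.') = d)) := by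
  induction d with
  | nil =>
    intro r
    cases r with
    | nil => simp
    | cons c r' =>
      rw [List.takeWhile_cons]
      by_cases hc : c = '.'
      · subst hc; simp
      · simp [List.cons_prefix_cons, hc, Ne.symm hc]
  | cons a d' ih =>
    intro r
    have ha : a ≠ '.' := hd a (by simp)
    have hd' : ∀ c ∈ d', c ≠ '.' := fun c hc => hd c (by simp [hc])
    cases r with
    | nil => simp
    | cons c r' =>
      rw [List.cons_append, List.cons_prefix_cons, List.takeWhile_cons]
      by_cases hc : c = a
      · subst hc
        rw [ih hd' r']
        simp [ha, Ne.symm ha]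
      · by_cases hcd : c = '.'
        · subst hcd
          simp [Ne.symm hc]
        · simp [hc, hcd, Ne.symm hc]

-- endswith with a dotted extension, phrased on the reversed list
lemma endswith_dot_iff (l e : List Char) (he : ∀ c ∈ e, c ≠ '.') :
    (PySem.Chars.endswith l ('.' :: e) = true) ↔
      ('.' ∈ l ∧ l.reverse.takeWhile (· ≠ '.') = e.reverse) := by
  rw [PySem.Chars.endswith_iff, ← List.reverse_prefix, List.reverse_cons,
      prefix_dot_iff e.reverse (fun c hc => he c (List.mem_reverse.mp hc)) l.reverse,
      List.mem_reverse]

-- if l has no '.' then endswith with any dotted extension is false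
lemma endswith_dot_false (l e : List Char) (hne : '.' ∉ l) :
    PySem.Chars.endswith l ('.' :: e) = false := by
  rw [Bool.eq_false_iff]
  intro h
  have := (PySem.Chars.endswith_iff l ('.' :: e)).mp h
  exact hne (this.mem (by simp))

lemma ofList_rev_lit (t c : List Char) :
    (String.ofList t.reverse = String.ofList c) ↔ (t = c.reverse) := by
  constructor
  · intro h
    have := congrArg String.toList h
    simp at this
    simpa [List.reverse_eq_iff] using this
  · intro h; subst h; simp

-- the list-level core: the 14-way endswith scan equals the rsplit-and-lookup test
set_option maxRecDepth 4096 in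
lemma core (l : List Char) :
    ([".pdf", ".jpg", ".jpeg", ".png", ".gif", ".svg", ".zip",
      ".mp4", ".mp3", ".avi", ".doc", ".docx", ".xls", ".xlsx"].any
        (fun ext => PySem.Chars.endswith l ext.toList)) =
    (match pyRsplit1Dot l with
     | [_, ext] => PySem.Set.contains skipExts (String.ofList ext)
     | _ => false) := by
  unfold pyRsplit1Dot
  simp only [List.any_cons, List.any_nil, Bool.or_false,
    show (".pdf" : String).toList = '.' :: ['p','d','f'] from rfl,
    show (".jpg" : String).toList = '.' :: ['j','p','g'] from rfl,
    show (".jpeg" : String).toList = '.' :: ['j','p','e','g'] from rfl,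
    show (".png" : String).toList = '.' :: ['p','n','g'] from rfl,
    show (".gif" : String).toList = '.' :: ['g','i','f'] from rfl,
    show (".svg" : String).toList = '.' :: ['s','v','g'] from rfl,
    show (".zip" : String).toList = '.' :: ['z','i','p'] from rfl,
    show (".mp4" : String).toList = '.' :: ['m','p','4'] from rfl,
    show (".mp3" : String).toList = '.' :: ['m','p','3'] from rfl,
    show (".avi" : String).toList = '.' :: ['a','v','i'] from rfl,
    show (".doc" : String).toList = '.' :: ['d','o','c'] from rfl,
    show (".docx" : String).toList = '.' :: ['d','o','c','x'] from rfl,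
    show (".xls" : String).toList = '.' :: ['x','l','s'] from rfl,
    show (".xlsx" : String).toList = '.' :: ['x','l','s','x'] from rfl]
  by_cases hdot : '.' ∈ l
  · have hlt : ¬ ((l.reverse.takeWhile (· ≠ '.')).length = l.reverse.length) := by
      intro hlen
      have heqr : l.reverse.takeWhile (· ≠ '.') = l.reverse :=
        (List.takeWhile_sublist _).eq_of_length hlen
      have := List.takeWhile_eq_self_iff.mp heqr '.' (List.mem_reverse.mpr hdot)
      simp at this
    simp only [hlt, if_false]
    have heq : ∀ (e : List Char), (∀ c ∈ e, c ≠ '.') →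
        PySem.Chars.endswith l ('.' :: e) =
          decide (l.reverse.takeWhile (· ≠ '.') = e.reverse) := by
      intro e he
      by_cases h : l.reverse.takeWhile (· ≠ '.') = e.reverse
      · rw [(endswith_dot_iff l e he).mpr ⟨hdot, h⟩, h]
        simp
      · simp only [h, decide_false]
        rw [Bool.eq_false_iff]
        intro hx
        exact h ((endswith_dot_iff l e he).mp hx).2
    rw [heq ['p','d','f'] (by simp), heq ['j','p','g'] (by simp),
        heq ['j','p','e','g'] (by simp), heq ['p','n','g'] (by simp),
        heq ['g','i','f'] (by simp), heq ['s','v','g'] (by simp),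
        heq ['z','i','p'] (by simp), heq ['m','p','4'] (by simp),
        heq ['m','p','3'] (by simp), heq ['a','v','i'] (by simp),
        heq ['d','o','c'] (by simp), heq ['d','o','c','x'] (by simp),
        heq ['x','l','s'] (by simp), heq ['x','l','s','x'] (by simp)]
    generalize l.reverse.takeWhile (· ≠ '.') = t
    show _ = PySem.Set.contains skipExts (String.ofList t.reverse)
    rw [show skipExts = ["pdf", "jpg", "jpeg", "png", "gif", "svg", "zip",
          "mp4", "mp3", "avi", "doc", "docx", "xls", "xlsx"] from by decide]
    simp only [PySem.Set.contains, List.contains_eq_mem, List.mem_cons, List.not_mem_nil,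
      or_false, Bool.decide_or,
      show ("pdf" : String) = String.ofList ['p','d','f'] from rfl,
      show ("jpg" : String) = String.ofList ['j','p','g'] from rfl,
      show ("jpeg" : String) = String.ofList ['j','p','e','g'] from rfl,
      show ("png" : String) = String.ofList ['p','n','g'] from rfl,
      show ("gif" : String) = String.ofList ['g','i','f'] from rfl,
      show ("svg" : String) = String.ofList ['s','v','g'] from rfl,
      show ("zip" : String) = String.ofList ['z','i','p'] from rfl,
      show ("mp4" : String) = String.ofList ['m','p','4'] from rfl,
      show ("mp3" : String) = String.ofList ['m','p','3'] from rfl,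
      show ("avi" : String) = String.ofList ['a','v','i'] from rfl,
      show ("doc" : String) = String.ofList ['d','o','c'] from rfl,
      show ("docx" : String) = String.ofList ['d','o','c','x'] from rfl,
      show ("xls" : String) = String.ofList ['x','l','s'] from rfl,
      show ("xlsx" : String) = String.ofList ['x','l','s','x'] from rfl,
      ofList_rev_lit]
  · have hlen : (l.reverse.takeWhile (· ≠ '.')).length = l.reverse.length := by
      rw [List.takeWhile_eq_self_iff.mpr]
      intro c hc
      simp only [decide_eq_true_eq, ne_eq]
      intro h; exact hdot (by subst h; exact List.mem_reverse.mp hc)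
    simp only [hlen, if_true]
    simp [endswith_dot_false l _ hdot]

-- ===== VERDICT (by name: the statement is the Claim_ definition above) =====
theorem should_skip_url_py_spec : Claim_equal_should_skip_url_py := by
  intro url _
  unfold Spec_should_skip_url_py should_skip_url_py should_skip_url_py_alt
  simp only [PySem.Str.endswith_eq, PySem.Str.toList_lower]
  exact core (PySem.Chars.lower url.toList)
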